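-- pv_equiv track=rewrite | github.com/jethromosco/mosco | packingseals/wipermono/ui/mm.py | _compute_stock_map
-- ===== SOURCE A (Python) =====
-- from typing import Dict, List, Tuple, Any
--
-- def apply_stock_transaction(current_stock: Any, transaction_qty: int, is_restock: bool) -> Any:
--     """Apply a transaction to current stock following the unknown stock rules.
--
--     Rules:
--     - If current stock would go negative from a sale, set to None (unknown)
--     - If current stock is unknown (None) and it's a sale, keep as None
--     - If current stock is unknown (None) and it's a restock, apply the restock amount
--     - Otherwise, apply the transaction normally
--
--     Args:
--         current_stock: Current stock value (int or None)
--         transaction_qty: Quantity to add/subtract (positive for restock, negative for sale)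
--         is_restock: True if this is a restock transaction, False if sale
--
--     Returns:
--         Updated stock value (int or None)
--     """
--     # If current stock is unknown
--     if current_stock is None:
--         if is_restock and transaction_qty > 0:
--             # Restock: apply the amount
--             return int(transaction_qty)
--         else:
--             # Sale or invalid restock: keep as unknown
--             return None
--
--     # Current stock is known
--     new_stock = int(current_stock) + int(transaction_qty)
--
--     # If sale would make stock negative, mark as unknown
--     if not is_restock and new_stock < 0:
--         return None
--
--     # Otherwise apply normally
--     return max(0, new_stock)  # Ensure non-negative for valid calculations
--
-- def _compute_stock_map(all_transactions: List[Tuple[Any, ...]]) -> Dict[Tuple[str, str, str, str], Any]: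
--     """Compute stock map from transactions, handling unknown stock.
--     Returns dict mapping product key to stock value (int or None).
--     """
--     stock_map: Dict[Tuple[str, str, str, str, str], Any] = {}
--     for row in all_transactions:
--         # Expect: type, id, od, th, brand, quantity, is_restock
--         type_, id_raw, od_raw, th_raw, brand, quantity, is_restock = row
--         key = (type_, id_raw, od_raw, th_raw, str(brand).strip().upper())
--
--         if is_restock == 2:
--             # Actual count: reset stock
--             stock_map[key] = int(quantity)
--         else:
--             # Apply transaction (restock=1 or sale=0)
--             current = stock_map.get(key, 0)
--             is_restock_tx = (is_restock == 1)
--             stock_map[key] = apply_stock_transaction(current, int(quantity), is_restock_tx)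
--     return stock_map
-- ===== SOURCE B (Python) =====
-- from typing import Dict, List, Tuple, Any
--
--
-- def apply_stock_transaction(current_stock: Any, transaction_qty: int, is_restock: bool) -> Any:
--     """Same module helper as in A: apply one transaction under the unknown-stock rules."""
--     if current_stock is None:
--         if is_restock and transaction_qty > 0:
--             return int(transaction_qty)
--         else:
--             return None
--     new_stock = int(current_stock) + int(transaction_qty)
--     if not is_restock and new_stock < 0:
--         return None
--     return max(0, new_stock)
--
--
-- def _fold_stock(txs: List[Tuple[int, int]]) -> Any:
--     """Reduce one product's transaction list (in original order) to its stock value."""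
--     stock: Any = 0
--     for qty, is_restock in txs:
--         if is_restock == 2:
--             stock = int(qty)
--         else:
--             stock = apply_stock_transaction(stock, int(qty), is_restock == 1)
--     return stock
--
--
-- def _compute_stock_map(all_transactions: List[Tuple[Any, ...]]) -> Dict[Tuple[str, str, str, str], Any]:
--     # Pass 1: group the transactions per product key, preserving order.
--     groups: Dict[Tuple[str, str, str, str, str], List[Tuple[int, int]]] = {}
--     for row in all_transactions:
--         type_, id_raw, od_raw, th_raw, brand, quantity, is_restock = row
--         key = (type_, id_raw, od_raw, th_raw, str(brand).strip().upper())
--         groups.setdefault(key, []).append((quantity, is_restock))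
--     # Pass 2: fold each group's transactions into a single stock value.
--     return {key: _fold_stock(txs) for key, txs in groups.items()}
-- ===== Notes on version B (the rewrite author's own statement) =====
-- stated objective: alternative
-- what changed: A folds every transaction directly into one running stock dict; B first groups the transactions per normalized product key (one ordered-dict pass) and then reduces each group's transaction list independently to its stock value.
import Mathlib
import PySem

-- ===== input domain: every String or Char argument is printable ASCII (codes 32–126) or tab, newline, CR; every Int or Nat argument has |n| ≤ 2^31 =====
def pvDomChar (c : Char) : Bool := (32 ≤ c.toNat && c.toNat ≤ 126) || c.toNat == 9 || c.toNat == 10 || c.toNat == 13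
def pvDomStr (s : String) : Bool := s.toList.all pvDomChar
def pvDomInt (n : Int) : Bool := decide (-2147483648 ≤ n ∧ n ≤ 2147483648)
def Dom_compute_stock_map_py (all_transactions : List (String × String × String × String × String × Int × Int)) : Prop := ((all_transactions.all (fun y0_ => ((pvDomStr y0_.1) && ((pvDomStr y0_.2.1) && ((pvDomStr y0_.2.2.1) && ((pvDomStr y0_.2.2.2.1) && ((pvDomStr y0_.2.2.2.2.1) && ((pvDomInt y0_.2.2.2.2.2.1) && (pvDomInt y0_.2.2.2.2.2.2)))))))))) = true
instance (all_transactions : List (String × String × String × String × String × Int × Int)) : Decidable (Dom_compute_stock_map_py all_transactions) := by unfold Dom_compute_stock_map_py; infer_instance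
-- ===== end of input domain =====

-- B replaces A's single running-stock dict with a group-then-reduce decomposition
-- (same cost, different structure); equivalence is about the RETURN value.

-- ===== PORT A =====
-- shared module helper apply_stock_transaction (both Pythons call it)
def applyStockTransaction (current : Option Int) (qty : Int) (isRestock : Bool) : Option Int :=
  match current with
  | none => if isRestock && decide (qty > 0) then some qty else none
  | some c =>
    if !isRestock && decide (c + qty < 0) then none
    else some (max 0 (c + qty))

-- key = (type_, id_raw, od_raw, th_raw, str(brand).strip().upper())
def pvKeyOf (row : String × String × String × String × String × Int × Int) :
    String × String × String × String × String :=
  (row.1, row.2.1, row.2.2.1, row.2.2.2.1, PySem.Str.upper (PySem.Str.strip row.2.2.2.2.1))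

-- one iteration of A's loop body
def pvAStep (d : PySem.Dict (String × String × String × String × String) (Option Int))
    (row : String × String × String × String × String × Int × Int) :
    PySem.Dict (String × String × String × String × String) (Option Int) :=
  let key := pvKeyOf row
  let quantity := row.2.2.2.2.2.1
  let is_restock := row.2.2.2.2.2.2
  if is_restock == 2 then
    d.insert key (some quantity)
  else
    let current := d.getD key (some 0)
    d.insert key (applyStockTransaction current quantity (is_restock == 1))

def compute_stock_map_py (all_transactions : List (String × String × String × String × String × Int × Int)) : List (String × String × String × String × String × Option Int) :=
  ((all_transactions.foldl pvAStep PySem.Dict.empty).items.map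
    (fun p => (p.1.1, p.1.2.1, p.1.2.2.1, p.1.2.2.2.1, p.1.2.2.2.2, p.2)))

-- ===== PORT B =====
-- one step of B's _fold_stock loop
def pvBStep (stock : Option Int) (t : Int × Int) : Option Int :=
  if t.2 == 2 then some t.1 else applyStockTransaction stock t.1 (t.2 == 1)

-- pass 1 body: groups.setdefault(key, []).append((quantity, is_restock))
def pvGroupStep (g : PySem.Dict (String × String × String × String × String) (List (Int × Int)))
    (row : String × String × String × String × String × Int × Int) :
    PySem.Dict (String × String × String × String × String) (List (Int × Int)) :=
  g.modify (pvKeyOf row) [] (· ++ [(row.2.2.2.2.2.1, row.2.2.2.2.2.2)])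

-- pass 2: {key: _fold_stock(txs) for key, txs in groups.items()} (keys are distinct, so
-- the comprehension emits one entry per group in order)
def compute_stock_map_py_alt (all_transactions : List (String × String × String × String × String × Int × Int)) : List (String × String × String × String × String × Option Int) :=
  ((all_transactions.foldl pvGroupStep PySem.Dict.empty).items.map
    (fun p => (p.1.1, p.1.2.1, p.1.2.2.1, p.1.2.2.2.1, p.1.2.2.2.2, p.2.foldl pvBStep (some 0))))

-- ===== PRECONDITION & SPEC =====
def Spec_compute_stock_map_py (all_transactions : List (String × String × String × String × String × Int × Int)) (out : List (String × String × String × String × String × Option Int)) : Prop := out = compute_stock_map_py_alt all_transactions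
instance (all_transactions : List (String × String × String × String × String × Int × Int)) (out : List (String × String × String × String × String × Option Int)) : Decidable (Spec_compute_stock_map_py all_transactions out) := by
  unfold Spec_compute_stock_map_py
  haveI h3 : DecidableEq (String × String × Option Int) := instDecidableEqProd
  haveI h4 : DecidableEq (String × String × String × Option Int) := instDecidableEqProd
  haveI h5 : DecidableEq (String × String × String × String × Option Int) := instDecidableEqProd
  haveI h6 : DecidableEq (String × String × String × String × String × Option Int) := instDecidableEqProd
  exact instDecidableEqList out (compute_stock_map_py_alt all_transactions)

-- ===== CLAIM (what is proved, stated in full; the proofs are below) =====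
def Claim_equal_compute_stock_map_py : Prop := ∀ (all_transactions : List (String × String × String × String × String × Int × Int)), Dom_compute_stock_map_py all_transactions → Spec_compute_stock_map_py all_transactions (compute_stock_map_py all_transactions)

-- ===== LEMMAS AND PROOFS =====

-- value map: a group entry becomes a stock entry (proof-only)
def pvF (p : (String × String × String × String × String) × List (Int × Int)) :
    (String × String × String × String × String) × Option Int :=
  (p.1, p.2.foldl pvBStep (some 0))

lemma pv_get?_map_F (L : List ((String × String × String × String × String) × List (Int × Int)))
    (k : String × String × String × String × String) :
    (PySem.Dict.mk (L.map pvF)).get? k = ((PySem.Dict.mk L).get? k).map (·.foldl pvBStep (some 0)) := by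
  induction L with
  | nil => rfl
  | cons p rest ih =>
    obtain ⟨k0, v0⟩ := p
    simp only [List.map_cons, pvF, PySem.Dict.get?_mk_cons]
    split <;> simp [ih]

lemma pv_getD_map_F (L : List ((String × String × String × String × String) × List (Int × Int)))
    (k : String × String × String × String × String) :
    (PySem.Dict.mk (L.map pvF)).getD k (some 0) = ((PySem.Dict.mk L).getD k []).foldl pvBStep (some 0) := by
  rw [PySem.Dict.getD_eq_get?_getD, PySem.Dict.getD_eq_get?_getD, pv_get?_map_F]
  cases (PySem.Dict.mk L).get? k <;> rfl

lemma pv_contains_map_F (L : List ((String × String × String × String × String) × List (Int × Int)))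
    (k : String × String × String × String × String) :
    (PySem.Dict.mk (L.map pvF)).contains k = (PySem.Dict.mk L).contains k := by
  induction L with
  | nil => rfl
  | cons p rest ih =>
    simp only [List.map_cons, pvF, PySem.Dict.contains_mk, List.any_cons] at *
    rw [ih]

lemma pv_insert_map_F (L : List ((String × String × String × String × String) × List (Int × Int)))
    (k : String × String × String × String × String) (xs : List (Int × Int)) :
    (PySem.Dict.mk (L.map pvF)).insert k (xs.foldl pvBStep (some 0))
      = PySem.Dict.mk ((((PySem.Dict.mk L).insert k xs)).items.map pvF) := by
  apply PySem.Dict.ext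
  by_cases h : (PySem.Dict.mk L).contains k
  · rw [PySem.Dict.items_insert_of_contains _ _ ((pv_contains_map_F L k).trans h),
        PySem.Dict.items_insert_of_contains _ _ h]
    simp only [List.map_map]
    apply List.map_congr_left
    intro p _
    rcases eq_or_ne p.1 k with hk | hk <;> simp [pvF, hk]
  · rw [PySem.Dict.items_insert_of_not_contains _ _ (by rw [pv_contains_map_F]; exact eq_false_of_ne_true h),
        PySem.Dict.items_insert_of_not_contains _ _ (eq_false_of_ne_true h)]
    simp [pvF]

lemma pv_aStep_eq_insert_bStep
    (d : PySem.Dict (String × String × String × String × String) (Option Int))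
    (row : String × String × String × String × String × Int × Int) :
    pvAStep d row = d.insert (pvKeyOf row)
      (pvBStep (d.getD (pvKeyOf row) (some 0)) (row.2.2.2.2.2.1, row.2.2.2.2.2.2)) := by
  unfold pvAStep pvBStep
  by_cases h : row.2.2.2.2.2.2 == 2 <;> simp [h]

lemma pv_step_comm (L : List ((String × String × String × String × String) × List (Int × Int)))
    (row : String × String × String × String × String × Int × Int) :
    pvAStep (PySem.Dict.mk (L.map pvF)) row
      = PySem.Dict.mk ((pvGroupStep (PySem.Dict.mk L) row).items.map pvF) := by
  rw [pv_aStep_eq_insert_bStep, pv_getD_map_F]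
  show _ = PySem.Dict.mk ((((PySem.Dict.mk L).insert (pvKeyOf row)
      ((PySem.Dict.mk L).getD (pvKeyOf row) [] ++ [(row.2.2.2.2.2.1, row.2.2.2.2.2.2)])).items.map pvF))
  rw [← pv_insert_map_F, List.foldl_append]
  rfl

lemma pv_loop_comm (l : List (String × String × String × String × String × Int × Int))
    (L : List ((String × String × String × String × String) × List (Int × Int))) :
    l.foldl pvAStep (PySem.Dict.mk (L.map pvF))
      = PySem.Dict.mk ((l.foldl pvGroupStep (PySem.Dict.mk L)).items.map pvF) := by
  induction l generalizing L with
  | nil => rfl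
  | cons row rest ih =>
    rw [List.foldl_cons, List.foldl_cons, pv_step_comm, ih]

-- ===== VERDICT (by name: the statement is the Claim_ definition above) =====
theorem compute_stock_map_py_spec : Claim_equal_compute_stock_map_py := by
  intro l _
  show compute_stock_map_py l = compute_stock_map_py_alt l
  unfold compute_stock_map_py compute_stock_map_py_alt
  rw [show (PySem.Dict.empty : PySem.Dict (String × String × String × String × String) (Option Int))
        = PySem.Dict.mk (List.map pvF []) from rfl, pv_loop_comm]
  show ((l.foldl pvGroupStep (PySem.Dict.mk [])).items.map pvF).map _ = _
  rw [List.map_map]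
  rfl
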